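-- pv_equiv track=rewrite | github.com/carrdelling/AdventOfCode2016 | day8/silver.py | solve
-- ===== SOURCE A (Python) =====
-- from itertools import product
--
-- def solve(data):
--
--     screen = set()
--     for ins in data:
--
--         if 'rect' in ins:
--             cols, rows = (int(x) for x in ins.split(' ')[-1].split('x'))
--
--             for x, y in product(range(rows), range(cols)):
--                 screen.add((x, y))
--             continue
--
--         if 'row' in ins:
--             chunks = ins.split(' ')
--             shift = int(chunks[-1])
--             row = int(chunks[-3].split('=')[-1])
--
--             in_row = [y for x, y in screen if x == row]
--             for y in in_row:
--                 screen.discard((row, y))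
--             for y in in_row:
--                 screen.add((row, (y + shift) % 50))
--             continue
--
--         if 'column' in ins:
--             chunks = ins.split(' ')
--             shift = int(chunks[-1])
--             col = int(chunks[-3].split('=')[-1])
--
--             in_col = [x for x, y in screen if y == col]
--             for x in in_col:
--                 screen.discard((x, col))
--             for x in in_col:
--                 screen.add(((x + shift) % 6, col))
--
--     solution = len(screen)
--
--     return solution
-- ===== SOURCE B (Python) =====
-- def solve(data):
--     grid = [[0] * 50 for _ in range(6)]
--     for ins in data:
--         words = ins.split(' ')
--         if 'rect' in ins:
--             a, b = (int(v) for v in words[-1].split('x'))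
--             for i in range(b):
--                 for j in range(a):
--                     grid[i][j] = 1
--         elif 'row' in ins:
--             shift = int(words[-1])
--             r = int(words[-3].split('=')[-1])
--             old = grid[r]
--             grid[r] = [old[(j - shift) % 50] for j in range(50)]
--         elif 'column' in ins:
--             shift = int(words[-1])
--             c = int(words[-3].split('=')[-1])
--             col = [grid[(i - shift) % 6][c] for i in range(6)]
--             for i in range(6):
--                 grid[i][c] = col[i]
--     return sum(map(sum, grid))
-- ===== Notes on version B (the rewrite author's own statement) =====
-- stated objective: alternative
-- what changed: B replaces A's set of lit (row,col) pairs (with per-instruction scan/discard/re-add of the set) by a dense 6x50 grid of 0/1 cells updated by modular re-indexing of the affected row or column, returning the grid sum.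
-- outside the precondition, e.g. on solve(['rect 2x7']): A returns 14, B raises IndexError; on solve(['rect 3x2', 'rotate row y=9 by 1']): A returns 6, B raises IndexError
import Mathlib
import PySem

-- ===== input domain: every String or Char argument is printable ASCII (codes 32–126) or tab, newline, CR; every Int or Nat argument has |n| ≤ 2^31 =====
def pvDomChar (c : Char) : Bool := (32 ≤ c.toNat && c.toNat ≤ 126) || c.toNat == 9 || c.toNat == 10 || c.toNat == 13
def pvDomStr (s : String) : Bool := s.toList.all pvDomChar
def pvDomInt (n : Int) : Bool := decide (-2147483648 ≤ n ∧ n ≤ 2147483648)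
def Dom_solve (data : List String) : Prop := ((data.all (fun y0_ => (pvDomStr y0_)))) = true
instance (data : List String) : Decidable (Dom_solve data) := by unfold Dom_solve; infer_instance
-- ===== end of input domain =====

-- B replaces A's set of lit coordinates by a dense 6×50 grid of 0/1 cells updated in
-- place (rotations become modular re-indexing of one row/column) and sums the cells;
-- same return value, a different data structure of similar cost.

-- ===== PORT A =====
-- shared thin wrapper: Python s.split(sep) for a non-empty literal sep (split? is none only for sep = "")
def pySplit (s sep : String) : List String := (PySem.Str.split? s sep).getD []

-- A's set iteration ([y for x, y in screen if x == row]) is ported in the Set's list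
-- order; the final length does not depend on the iteration order.
def stepA (screen : PySem.Set (Int × Int)) (ins : String) : PySem.Set (Int × Int) :=
  if PySem.Str.isIn "rect" ins then
    -- cols, rows = (int(x) for x in ins.split(' ')[-1].split('x'))  (Pre_ ensures two int parts)
    let parts := pySplit ((PySem.List.pyGet? (pySplit ins " ") (-1)).getD "") "x"
    let cols := (PySem.Int.ofStr? ((PySem.List.pyGet? parts 0).getD "")).getD 0
    let rows := (PySem.Int.ofStr? ((PySem.List.pyGet? parts 1).getD "")).getD 0
    (PySem.List.pyRange 0 rows 1).foldl (fun s x =>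
      (PySem.List.pyRange 0 cols 1).foldl (fun s y => PySem.Set.add s (x, y)) s) screen
  else if PySem.Str.isIn "row" ins then
    let chunks := pySplit ins " "
    let shift := (PySem.Int.ofStr? ((PySem.List.pyGet? chunks (-1)).getD "")).getD 0
    let row := (PySem.Int.ofStr? ((PySem.List.pyGet? (pySplit ((PySem.List.pyGet? chunks (-3)).getD "") "=") (-1)).getD "")).getD 0
    let inRow := (screen.filter (fun p => p.1 == row)).map (fun p => p.2)
    let s1 := inRow.foldl (fun s y => PySem.Set.discard s (row, y)) screen
    inRow.foldl (fun s y => PySem.Set.add s (row, PySem.Int.mod (y + shift) 50)) s1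
  else if PySem.Str.isIn "column" ins then
    let chunks := pySplit ins " "
    let shift := (PySem.Int.ofStr? ((PySem.List.pyGet? chunks (-1)).getD "")).getD 0
    let col := (PySem.Int.ofStr? ((PySem.List.pyGet? (pySplit ((PySem.List.pyGet? chunks (-3)).getD "") "=") (-1)).getD "")).getD 0
    let inCol := (screen.filter (fun p => p.2 == col)).map (fun p => p.1)
    let s1 := inCol.foldl (fun s x => PySem.Set.discard s (x, col)) screen
    inCol.foldl (fun s x => PySem.Set.add s (PySem.Int.mod (x + shift) 6, col)) s1
  else screen

def solve (data : List String) : Int :=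
  PySem.Set.len (data.foldl stepA PySem.Set.empty)

-- ===== PORT B =====
def stepB (grid : List (List Int)) (ins : String) : List (List Int) :=
  let words := pySplit ins " "
  if PySem.Str.isIn "rect" ins then
    let parts := pySplit ((PySem.List.pyGet? words (-1)).getD "") "x"
    let a := (PySem.Int.ofStr? ((PySem.List.pyGet? parts 0).getD "")).getD 0
    let b := (PySem.Int.ofStr? ((PySem.List.pyGet? parts 1).getD "")).getD 0
    (PySem.List.pyRange 0 b 1).foldl (fun g i =>
      PySem.List.pySetD g i
        ((PySem.List.pyRange 0 a 1).foldl (fun r j => PySem.List.pySetD r j 1)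
          (PySem.List.pyGetD g i []))) grid
  else if PySem.Str.isIn "row" ins then
    let shift := (PySem.Int.ofStr? ((PySem.List.pyGet? words (-1)).getD "")).getD 0
    let r := (PySem.Int.ofStr? ((PySem.List.pyGet? (pySplit ((PySem.List.pyGet? words (-3)).getD "") "=") (-1)).getD "")).getD 0
    let old := PySem.List.pyGetD grid r []
    PySem.List.pySetD grid r
      ((PySem.List.pyRange 0 50 1).map (fun j => PySem.List.pyGetD old (PySem.Int.mod (j - shift) 50) 0))
  else if PySem.Str.isIn "column" ins then
    let shift := (PySem.Int.ofStr? ((PySem.List.pyGet? words (-1)).getD "")).getD 0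
    let c := (PySem.Int.ofStr? ((PySem.List.pyGet? (pySplit ((PySem.List.pyGet? words (-3)).getD "") "=") (-1)).getD "")).getD 0
    let col := (PySem.List.pyRange 0 6 1).map (fun i =>
      PySem.List.pyGetD (PySem.List.pyGetD grid (PySem.Int.mod (i - shift) 6) []) c 0)
    (PySem.List.pyRange 0 6 1).foldl (fun g i =>
      PySem.List.pySetD g i
        (PySem.List.pySetD (PySem.List.pyGetD g i []) c (PySem.List.pyGetD col i 0))) grid
  else grid

def solve_alt (data : List String) : Int :=
  ((data.foldl stepB (List.replicate 6 (List.replicate 50 (0 : Int)))).map List.sum).sum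

-- ===== PRECONDITION & SPEC =====
-- 'rotate row/column' lines with a well-formed index: words[-3] and words[-1] exist,
-- 'int(...)' succeeds on both, and the index lies inside the 6×50 screen.
def pvIdxOK (w : List String) (n : Int) : Bool :=
  match PySem.List.pyGet? w (-3), PySem.List.pyGet? w (-1) with
  | some c3, some c1 =>
    (match PySem.Int.ofStr? ((PySem.List.pyGet? (pySplit c3 "=") (-1)).getD ""),
           PySem.Int.ofStr? c1 with
     | some r, some _ => decide (0 ≤ r ∧ r < n)
     | _, _ => false)
  | _, _ => false

def pvLineOK (s : String) : Bool :=
  if PySem.Str.isIn "rect" s then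
    match pySplit ((PySem.List.pyGet? (pySplit s " ") (-1)).getD "") "x" with
    | [u, v] =>
      (match PySem.Int.ofStr? u, PySem.Int.ofStr? v with
       | some a, some b => decide (1 ≤ a ∧ a ≤ 50 ∧ 1 ≤ b ∧ b ≤ 6)
       | _, _ => false)
    | _ => false
  else if PySem.Str.isIn "row" s then pvIdxOK (pySplit s " ") 6
  else if PySem.Str.isIn "column" s then pvIdxOK (pySplit s " ") 50
  else true

-- Pre_ excludes (a) malformed instruction lines, on which A raises, and (b) lines whose
-- parsed numbers leave the 6×50 screen (oversized rect, out-of-range row/column index):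
-- there A silently tracks pixels that a 6×50 screen does not have, while B's dense grid
-- raises IndexError.
def Pre_solve (data : List String) : Prop := ∀ s ∈ data, pvLineOK s = true
instance (data : List String) : Decidable (Pre_solve data) := by unfold Pre_solve; infer_instance

def pvWitness_solve : List String :=
  ["rect 3x2", "rotate column x=1 by 1", "rotate row y=0 by 4", "noise"]

def Spec_solve (data : List String) (out : Int) : Prop := out = solve_alt data
instance (data : List String) (out : Int) : Decidable (Spec_solve data out) := by unfold Spec_solve; infer_instance

-- ===== CLAIM (what is proved, stated in full; the proofs are below) =====
def Claim_equal_solve : Prop := ∀ (data : List String), Dom_solve data → Pre_solve data → Spec_solve data (solve data)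

-- ===== LEMMAS AND PROOFS =====

-- the cell of a grid, with Python-style total indexing
def cell (g : List (List Int)) (i j : Int) : Int :=
  PySem.List.pyGetD (PySem.List.pyGetD g i []) j 0

def GoodGrid (g : List (List Int)) : Prop :=
  g.length = 6 ∧
  (∀ i : Int, 0 ≤ i → i < 6 → (PySem.List.pyGetD g i []).length = 50) ∧
  (∀ i j : Int, 0 ≤ i → i < 6 → 0 ≤ j → j < 50 → (cell g i j = 0 ∨ cell g i j = 1))

-- the simulation invariant: screen set and grid show the same picture
def SG (s : List (Int × Int)) (g : List (List Int)) : Prop :=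
  s.Nodup ∧ (∀ p ∈ s, 0 ≤ p.1 ∧ p.1 < 6 ∧ 0 ≤ p.2 ∧ p.2 < 50) ∧ GoodGrid g ∧
  (∀ i j : Int, 0 ≤ i → i < 6 → 0 ≤ j → j < 50 → ((i, j) ∈ s ↔ cell g i j = 1))

-- ---- set-side fold characterisations ----

theorem mem_foldl_add {α β : Type} [BEq α] [LawfulBEq α] (f : β → α) (l : List β)
    (s : PySem.Set α) (p : α) :
    p ∈ l.foldl (fun s y => PySem.Set.add s (f y)) s ↔ p ∈ s ∨ ∃ y ∈ l, p = f y := by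
  induction l generalizing s with
  | nil => simp
  | cons a t ih =>
    rw [List.foldl_cons, ih]
    rw [PySem.Set.mem_add]
    simp only [List.mem_cons]
    constructor
    · rintro ((h | h) | ⟨y, hy, rfl⟩)
      · exact Or.inl h
      · exact Or.inr ⟨a, Or.inl rfl, h⟩
      · exact Or.inr ⟨y, Or.inr hy, rfl⟩
    · rintro (h | ⟨y, (rfl | hy), rfl⟩)
      · exact Or.inl (Or.inl h)
      · exact Or.inl (Or.inr rfl)
      · exact Or.inr ⟨y, hy, rfl⟩

theorem nodup_foldl_add {α β : Type} [BEq α] [LawfulBEq α] (f : β → α) (l : List β)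
    (s : PySem.Set α) (h : s.Nodup) :
    (l.foldl (fun s y => PySem.Set.add s (f y)) s).Nodup := by
  induction l generalizing s with
  | nil => exact h
  | cons a t ih => exact ih _ (PySem.Set.nodup_add _ _ h)

theorem mem_foldl_discard {α β : Type} [BEq α] [LawfulBEq α] (f : β → α) (l : List β)
    (s : PySem.Set α) (p : α) :
    p ∈ l.foldl (fun s y => PySem.Set.discard s (f y)) s ↔ p ∈ s ∧ ∀ y ∈ l, p ≠ f y := by
  induction l generalizing s with
  | nil => simp
  | cons a t ih =>
    rw [List.foldl_cons, ih]
    rw [PySem.Set.mem_discard]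
    simp only [List.mem_cons]
    constructor
    · rintro ⟨⟨hp, hne⟩, hall⟩
      refine ⟨hp, ?_⟩
      rintro y (rfl | hy)
      · exact hne
      · exact hall y hy
    · rintro ⟨hp, hall⟩
      exact ⟨⟨hp, hall a (Or.inl rfl)⟩, fun y hy => hall y (Or.inr hy)⟩

theorem nodup_foldl_discard {α β : Type} [BEq α] (f : β → α) (l : List β)
    (s : PySem.Set α) (h : s.Nodup) :
    (l.foldl (fun s y => PySem.Set.discard s (f y)) s).Nodup := by
  induction l generalizing s with
  | nil => exact h
  | cons a t ih => exact ih _ (PySem.Set.nodup_discard _ _ h)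

theorem mem_rectA (ri ci : Int) (s : PySem.Set (Int × Int)) (p : Int × Int) :
    p ∈ (PySem.List.pyRange 0 ri).foldl
        (fun s x => (PySem.List.pyRange 0 ci).foldl (fun s y => PySem.Set.add s (x, y)) s) s ↔
      p ∈ s ∨ (0 ≤ p.1 ∧ p.1 < ri ∧ 0 ≤ p.2 ∧ p.2 < ci) := by
  have gen : ∀ (l : List Int) (s : PySem.Set (Int × Int)),
      p ∈ l.foldl (fun s x => (PySem.List.pyRange 0 ci).foldl (fun s y => PySem.Set.add s (x, y)) s) s ↔
        p ∈ s ∨ (p.1 ∈ l ∧ 0 ≤ p.2 ∧ p.2 < ci) := by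
    intro l
    induction l with
    | nil => simp
    | cons a t ih =>
      intro s
      rw [List.foldl_cons, ih]
      have hin := mem_foldl_add (fun y => ((a : Int), y)) (PySem.List.pyRange 0 ci) s p
      simp only [] at hin
      rw [hin]
      simp only [PySem.List.mem_pyRange_one, List.mem_cons, Prod.ext_iff]
      constructor
      · rintro ((h | ⟨y, ⟨hy0, hy1⟩, h1, h2⟩) | ⟨h1, h2, h3⟩)
        · exact Or.inl h
        · subst h2; exact Or.inr ⟨Or.inl h1, hy0, hy1⟩
        · exact Or.inr ⟨Or.inr h1, h2, h3⟩
      · rintro (h | ⟨(h1 | h1), h2, h3⟩)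
        · exact Or.inl (Or.inl h)
        · exact Or.inl (Or.inr ⟨p.2, ⟨h2, h3⟩, h1, rfl⟩)
        · exact Or.inr ⟨h1, h2, h3⟩
  rw [gen]
  simp only [PySem.List.mem_pyRange_one]
  tauto

theorem nodup_rectA (ri ci : Int) (s : PySem.Set (Int × Int)) (h : s.Nodup) :
    ((PySem.List.pyRange 0 ri).foldl
        (fun s x => (PySem.List.pyRange 0 ci).foldl (fun s y => PySem.Set.add s (x, y)) s) s).Nodup := by
  induction (PySem.List.pyRange 0 ri) generalizing s with
  | nil => exact h
  | cons a t ih => exact ih _ (nodup_foldl_add (fun y => ((a : Int), y)) _ s h)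

-- membership in A's row / column comprehension
theorem mem_inRow (s : List (Int × Int)) (r y : Int) :
    y ∈ (s.filter (fun p => p.1 == r)).map (fun p => p.2) ↔ (r, y) ∈ s := by
  simp only [List.mem_map, List.mem_filter, beq_iff_eq]
  constructor
  · rintro ⟨⟨u, v⟩, ⟨hm, h1⟩, h2⟩
    simp only at h1 h2
    subst h1; subst h2; exact hm
  · intro h; exact ⟨(r, y), ⟨h, rfl⟩, rfl⟩

theorem mem_inCol (s : List (Int × Int)) (c x : Int) :
    x ∈ (s.filter (fun p => p.2 == c)).map (fun p => p.1) ↔ (x, c) ∈ s := by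
  simp only [List.mem_map, List.mem_filter, beq_iff_eq]
  constructor
  · rintro ⟨⟨u, v⟩, ⟨hm, h1⟩, h2⟩
    simp only at h1 h2
    subst h1; subst h2; exact hm
  · intro h; exact ⟨(x, c), ⟨h, rfl⟩, rfl⟩

-- ---- grid-side fold characterisations ----

theorem rowFill_length (a : Nat) (r : List Int) :
    ((PySem.List.pyRange 0 (a : Int)).foldl (fun r j => PySem.List.pySetD r j 1) r).length = r.length := by
  induction a generalizing r with
  | zero => rfl
  | succ n ih =>
    have : ((n : Nat) : Int) + 1 = (((n + 1 : Nat)) : Int) := by push_cast; ring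
    rw [← this, PySem.List.pyRange_one_succ_right (by positivity), List.foldl_append]
    simp [ih]

theorem rowFill_getD (a : Nat) (r : List Int) (ha : a ≤ r.length) (m : Int) (hm : 0 ≤ m) :
    PySem.List.pyGetD ((PySem.List.pyRange 0 (a : Int)).foldl (fun r j => PySem.List.pySetD r j 1) r) m 0
      = if m < (a : Int) then 1 else PySem.List.pyGetD r m 0 := by
  induction a generalizing r with
  | zero =>
    rw [if_neg (by omega)]
    rfl
  | succ n ih =>
    have hc : ((n : Nat) : Int) + 1 = (((n + 1 : Nat)) : Int) := by push_cast; ring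
    rw [← hc, PySem.List.pyRange_one_succ_right (by positivity), List.foldl_append]
    simp only [List.foldl_cons, List.foldl_nil]
    have hm' : m = ((m.toNat : Nat) : Int) := (Int.toNat_of_nonneg hm).symm
    have hlen : n < ((PySem.List.pyRange 0 (n : Int)).foldl (fun r j => PySem.List.pySetD r j 1) r).length := by
      rw [rowFill_length]; omega
    rw [hm']
    rw [PySem.List.pyGetD_pySetD_natCast _ n m.toNat _ _ hlen]
    rw [← hm']
    rw [ih r (by omega)]
    split_ifs <;> omega

theorem gridFold_length (F : Int → List Int → List Int) (n : Nat) (g : List (List Int)) :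
    ((PySem.List.pyRange 0 (n : Int)).foldl
      (fun g i => PySem.List.pySetD g i (F i (PySem.List.pyGetD g i []))) g).length = g.length := by
  induction n generalizing g with
  | zero => rfl
  | succ k ih =>
    have hc : ((k : Nat) : Int) + 1 = (((k + 1 : Nat)) : Int) := by push_cast; ring
    rw [← hc, PySem.List.pyRange_one_succ_right (by positivity), List.foldl_append]
    simp [ih]

theorem gridFold_getD (F : Int → List Int → List Int) (n : Nat) (g : List (List Int))
    (hn : n ≤ g.length) (m : Int) (hm : 0 ≤ m) :
    PySem.List.pyGetD ((PySem.List.pyRange 0 (n : Int)).foldl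
        (fun g i => PySem.List.pySetD g i (F i (PySem.List.pyGetD g i []))) g) m []
      = if m < (n : Int) then F m (PySem.List.pyGetD g m []) else PySem.List.pyGetD g m [] := by
  induction n generalizing g m with
  | zero =>
    rw [if_neg (by omega)]
    rfl
  | succ k ih =>
    have hc : ((k : Nat) : Int) + 1 = (((k + 1 : Nat)) : Int) := by push_cast; ring
    rw [← hc, PySem.List.pyRange_one_succ_right (by positivity), List.foldl_append]
    simp only [List.foldl_cons, List.foldl_nil]
    have hlen : k < ((PySem.List.pyRange 0 (k : Int)).foldl
        (fun g i => PySem.List.pySetD g i (F i (PySem.List.pyGetD g i []))) g).length := by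
      rw [gridFold_length]; omega
    have hm' : m = ((m.toNat : Nat) : Int) := (Int.toNat_of_nonneg hm).symm
    have hk := ih g (by omega) (k : Int) (by positivity)
    rw [if_neg (by omega)] at hk
    rw [hm']
    rw [PySem.List.pyGetD_pySetD_natCast _ k m.toNat _ _ hlen]
    rw [← hm', hk, ih g (by omega) m hm]
    split_ifs with h1 h2 h2 <;> try omega
    · have : m = (k : Int) := by omega
      rw [this]
    · rfl
    · rfl

-- ---- counting ----

theorem list_sum_getD (l : List Int) : l.sum = ∑ i ∈ Finset.range l.length, l.getD i 0 := by
  induction l with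
  | nil => simp
  | cons a t ih =>
    rw [List.sum_cons, ih, List.length_cons, Finset.sum_range_succ']
    simp [List.getD, add_comm]

theorem rel_count (s : List (Int × Int)) (g : List (List Int)) (hrel : SG s g) :
    (PySem.Set.len s) = (g.map List.sum).sum := by
  obtain ⟨hnd, hbox, ⟨hg6, hrow, h01⟩, hiff⟩ := hrel
  -- the grid sum, row by row
  have hgs : (g.map List.sum).sum
      = ∑ i ∈ Finset.range 6, ∑ j ∈ Finset.range 50,
          cell g ((i : Nat) : Int) ((j : Nat) : Int) := by
    rw [list_sum_getD (g.map List.sum), List.length_map, hg6]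
    refine Finset.sum_congr rfl ?_
    intro i hi
    simp only [Finset.mem_range] at hi
    have hgi : (g.map List.sum).getD i 0 = (PySem.List.pyGetD g (i : Int) []).sum := by
      rw [PySem.List.pyGetD_natCast]
      rcases Nat.lt_or_ge i g.length with h | h
      · rw [List.getD_eq_getElem _ _ (by simpa using h), List.getD_eq_getElem _ _ h,
            List.getElem_map]
      · omega
    rw [hgi, list_sum_getD, hrow (i : Int) (by positivity) (by exact_mod_cast hi)]
    refine Finset.sum_congr rfl ?_
    intro j hj
    simp only [Finset.mem_range] at hj
    rw [cell, PySem.List.pyGetD_natCast, PySem.List.pyGetD_natCast]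
  -- the screen, as a finset of cells
  have hsub : s.toFinset =
      ((Finset.range 6 ×ˢ Finset.range 50).filter
        (fun q : Nat × Nat => cell g (q.1 : Int) (q.2 : Int) = 1)).image
        (fun q : Nat × Nat => ((q.1 : Int), (q.2 : Int))) := by
    ext p
    simp only [List.mem_toFinset, Finset.mem_image, Finset.mem_filter, Finset.mem_product,
      Finset.mem_range]
    constructor
    · intro hp
      obtain ⟨h1, h2, h3, h4⟩ := hbox p hp
      refine ⟨(p.1.toNat, p.2.toNat), ⟨⟨by omega, by omega⟩, ?_⟩, ?_⟩
      · have e1 : ((p.1.toNat : Nat) : Int) = p.1 := Int.toNat_of_nonneg h1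
        have e2 : ((p.2.toNat : Nat) : Int) = p.2 := Int.toNat_of_nonneg h3
        rw [e1, e2]
        exact (hiff p.1 p.2 h1 h2 h3 h4).mp hp
      · have e1 : ((p.1.toNat : Nat) : Int) = p.1 := Int.toNat_of_nonneg h1
        have e2 : ((p.2.toNat : Nat) : Int) = p.2 := Int.toNat_of_nonneg h3
        simp [e1, e2]
    · rintro ⟨⟨i, j⟩, ⟨⟨hi, hj⟩, hc⟩, rfl⟩
      exact (hiff (i : Int) (j : Int) (by positivity) (by exact_mod_cast hi)
        (by positivity) (by exact_mod_cast hj)).mpr hc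
  have hinj : Set.InjOn (fun q : Nat × Nat => ((q.1 : Int), (q.2 : Int)))
      ((Finset.range 6 ×ˢ Finset.range 50).filter
        (fun q : Nat × Nat => cell g (q.1 : Int) (q.2 : Int) = 1)) := by
    rintro ⟨a, b⟩ _ ⟨c, d⟩ _ h
    simp only [Prod.mk.injEq, Nat.cast_inj] at h
    simp [h.1, h.2]
  have hlen : s.length = ((Finset.range 6 ×ˢ Finset.range 50).filter
      (fun q : Nat × Nat => cell g (q.1 : Int) (q.2 : Int) = 1)).card := by
    rw [← List.toFinset_card_of_nodup hnd, hsub, Finset.card_image_of_injOn hinj]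
  have hcard : (((Finset.range 6 ×ˢ Finset.range 50).filter
      (fun q : Nat × Nat => cell g (q.1 : Int) (q.2 : Int) = 1)).card : Int)
      = ∑ i ∈ Finset.range 6, ∑ j ∈ Finset.range 50, cell g (i : Int) (j : Int) := by
    rw [Finset.card_filter]
    push_cast
    rw [Finset.sum_product]
    refine Finset.sum_congr rfl ?_
    intro i hi
    refine Finset.sum_congr rfl ?_
    intro j hj
    simp only [Finset.mem_range] at hi hj
    rcases h01 (i : Int) (j : Int) (by positivity) (by exact_mod_cast hi)
      (by positivity) (by exact_mod_cast hj) with h | h <;> rw [h] <;> simp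
  show ((s.length : Int)) = _
  rw [hlen, hgs, hcard]

theorem rel_init : SG [] (List.replicate 6 (List.replicate 50 (0 : Int))) := by
  have hc : ∀ i j : Int, 0 ≤ i → i < 6 → 0 ≤ j → j < 50 →
      cell (List.replicate 6 (List.replicate 50 (0 : Int))) i j = 0 := by
    intro i j h0 h6 hj0 hj50
    have h1 : PySem.List.pyGetD (List.replicate 6 (List.replicate 50 (0 : Int))) i []
        = List.replicate 50 (0 : Int) := by
      rw [PySem.List.pyGetD_of_nonneg _ _ h0, List.getD_eq_getElem _ _ (by simp; omega),
        List.getElem_replicate]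
    rw [cell, h1, PySem.List.pyGetD_of_nonneg _ _ hj0,
      List.getD_eq_getElem _ _ (by simp; omega), List.getElem_replicate]
  refine ⟨List.nodup_nil, by simp, ⟨by simp, ?_, ?_⟩, ?_⟩
  · intro i h0 h6
    rw [PySem.List.pyGetD_of_nonneg _ _ h0, List.getD_eq_getElem _ _ (by simp; omega),
      List.getElem_replicate]
    simp
  · intro i j h0 h6 hj0 hj50
    exact Or.inl (hc i j h0 h6 hj0 hj50)
  · intro i j h0 h6 hj0 hj50
    simp only [List.not_mem_nil, false_iff]
    rw [hc i j h0 h6 hj0 hj50]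
    omega

set_option maxHeartbeats 2000000 in
theorem rel_step (s : List (Int × Int)) (g : List (List Int)) (ins : String)
    (hok : pvLineOK ins = true) (hrel : SG s g) : SG (stepA s ins) (stepB g ins) := by
  obtain ⟨hnd, hbox, ⟨hg6, hrow, h01⟩, hiff⟩ := hrel
  by_cases hrect : PySem.Str.isIn "rect" ins = true
  · -- rect branch
    simp only [pvLineOK, hrect, if_true] at hok
    simp only [stepA, stepB, hrect, if_true]
    split at hok
    · rename_i u v heq
      rw [heq]
      simp only [show PySem.List.pyGet? [u, v] 0 = some u from by
          simp [PySem.List.pyGet?, PySem.List.pyIdx?],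
        show PySem.List.pyGet? [u, v] 1 = some v from by
          simp [PySem.List.pyGet?, PySem.List.pyIdx?],
        Option.getD_some]
      split at hok
      · rename_i a b hequ heqv
        simp only [decide_eq_true_eq] at hok
        obtain ⟨ha1, ha2, hb1, hb2⟩ := hok
        rw [hequ, heqv]
        simp only [Option.getD_some]
        obtain ⟨aN, rfl⟩ : ∃ n : Nat, a = (n : Int) :=
          ⟨a.toNat, (Int.toNat_of_nonneg (by omega)).symm⟩
        obtain ⟨bN, rfl⟩ : ∃ n : Nat, b = (n : Int) :=
          ⟨b.toNat, (Int.toNat_of_nonneg (by omega)).symm⟩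
        have hGlen := gridFold_length
          (fun i row => (PySem.List.pyRange 0 (aN : Int)).foldl
            (fun r j => PySem.List.pySetD r j 1) row) bN g
        simp only [] at hGlen
        have hGget : ∀ m : Int, 0 ≤ m →
            PySem.List.pyGetD ((PySem.List.pyRange 0 (bN : Int)).foldl
              (fun g i => PySem.List.pySetD g i
                ((PySem.List.pyRange 0 (aN : Int)).foldl
                  (fun r j => PySem.List.pySetD r j 1) (PySem.List.pyGetD g i []))) g) m []
              = if m < (bN : Int) then
                  (PySem.List.pyRange 0 (aN : Int)).foldl
                    (fun r j => PySem.List.pySetD r j 1) (PySem.List.pyGetD g m [])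
                else PySem.List.pyGetD g m [] := by
          intro m hm
          have h := gridFold_getD
            (fun i row => (PySem.List.pyRange 0 (aN : Int)).foldl
              (fun r j => PySem.List.pySetD r j 1) row) bN g (by omega) m hm
          simpa using h
        refine ⟨nodup_rectA _ _ _ hnd, ?_, ⟨?_, ?_, ?_⟩, ?_⟩
        · intro p hp
          rw [mem_rectA] at hp
          rcases hp with hp | hp
          · exact hbox p hp
          · omega
        · exact hGlen.trans hg6
        · intro i h0 h6
          rw [hGget i h0]
          split_ifs with h
          · exact (rowFill_length aN _).trans (hrow i h0 h6)
          · exact hrow i h0 h6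
        · intro i j h0 h6 hj0 hj50
          simp only [cell]
          rw [hGget i h0]
          split_ifs with h
          · rw [rowFill_getD aN _ (by rw [hrow i h0 h6]; omega) j hj0]
            split_ifs with h2
            · exact Or.inr rfl
            · exact h01 i j h0 h6 hj0 hj50
          · exact h01 i j h0 h6 hj0 hj50
        · intro i j h0 h6 hj0 hj50
          rw [mem_rectA]
          simp only [cell]
          rw [hGget i h0]
          by_cases hi : i < (bN : Int)
          · rw [if_pos hi, rowFill_getD aN _ (by rw [hrow i h0 h6]; omega) j hj0]
            by_cases hj : j < (aN : Int)
            · rw [if_pos hj]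
              exact iff_of_true (Or.inr ⟨h0, hi, hj0, hj⟩) rfl
            · rw [if_neg hj]
              have hthis := hiff i j h0 h6 hj0 hj50
              constructor
              · rintro (hp | hb)
                · exact hthis.mp hp
                · exact absurd hb.2.2.2 hj
              · intro hcell
                exact Or.inl (hthis.mpr hcell)
          · rw [if_neg hi]
            have hthis := hiff i j h0 h6 hj0 hj50
            constructor
            · rintro (hp | hb)
              · exact hthis.mp hp
              · exact absurd hb.2.1 hi
            · intro hcell
              exact Or.inl (hthis.mpr hcell)
      · simp at hok
    · simp at hok
  · rw [Bool.not_eq_true] at hrect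
    by_cases hrw : PySem.Str.isIn "row" ins = true
    · -- row branch
      simp only [pvLineOK, hrect, hrw, Bool.false_eq_true, if_false, if_true] at hok
      simp only [stepA, stepB, hrect, hrw, Bool.false_eq_true, if_false, if_true]
      simp only [pvIdxOK] at hok
      split at hok
      · rename_i c3 c1 h3 h1
        split at hok
        · rename_i r k hre hke
          simp only [decide_eq_true_eq] at hok
          obtain ⟨hr0, hr6⟩ := hok
          rw [h3, h1]
          simp only [Option.getD_some]
          rw [hre, hke]
          simp only [Option.getD_some]
          have h50 : (0 : Int) < 50 := by norm_num
          have hS1 : ∀ p : Int × Int,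
              p ∈ List.foldl (fun s y => PySem.Set.discard s (r, y)) s
                  (List.map (fun p => p.2) (List.filter (fun p => p.1 == r) s)) ↔
                p ∈ s ∧ p.1 ≠ r := by
            intro p
            rw [mem_foldl_discard (fun y => (r, y))
              (List.map (fun p => p.2) (List.filter (fun p => p.1 == r) s)) s p]
            constructor
            · rintro ⟨hp, hall⟩
              refine ⟨hp, fun hpr => ?_⟩
              exact hall p.2 ((mem_inRow s r p.2).mpr (by rw [← hpr]; exact hp))
                (by rw [Prod.ext_iff]; exact ⟨hpr, rfl⟩)
            · rintro ⟨hp, hne⟩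
              refine ⟨hp, fun y hy heq => hne ?_⟩
              rw [heq]
          have hS2 : ∀ p : Int × Int,
              p ∈ List.foldl (fun s y => PySem.Set.add s (r, PySem.Int.mod (y + k) 50))
                  (List.foldl (fun s y => PySem.Set.discard s (r, y)) s
                    (List.map (fun p => p.2) (List.filter (fun p => p.1 == r) s)))
                  (List.map (fun p => p.2) (List.filter (fun p => p.1 == r) s)) ↔
                (p ∈ s ∧ p.1 ≠ r) ∨
                  ∃ y, (r, y) ∈ s ∧ p = (r, PySem.Int.mod (y + k) 50) := by
            intro p
            rw [mem_foldl_add (fun y => (r, PySem.Int.mod (y + k) 50))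
              (List.map (fun p => p.2) (List.filter (fun p => p.1 == r) s)) _ p, hS1 p]
            constructor
            · rintro (h | ⟨y, hy, heq⟩)
              · exact Or.inl h
              · exact Or.inr ⟨y, (mem_inRow s r y).mp hy, heq⟩
            · rintro (h | ⟨y, hy, heq⟩)
              · exact Or.inl h
              · exact Or.inr ⟨y, (mem_inRow s r y).mpr hy, heq⟩
          have hsel : ∀ (v : List Int) (m : Int), 0 ≤ m →
              PySem.List.pyGetD (PySem.List.pySetD g r v) m []
                = if m = r then v else PySem.List.pyGetD g m [] := by
            intro v m hm
            have hrN : r = ((r.toNat : Nat) : Int) := (Int.toNat_of_nonneg hr0).symm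
            have hmn : m = ((m.toNat : Nat) : Int) := (Int.toNat_of_nonneg hm).symm
            rw [hrN, hmn, PySem.List.pyGetD_pySetD_natCast _ r.toNat m.toNat _ _ (by omega)]
            by_cases h : m.toNat = r.toNat
            · rw [if_pos h, if_pos (by exact_mod_cast h)]
            · rw [if_neg h, if_neg (by omega)]
          have hnewget : ∀ j : Int, 0 ≤ j → j < 50 →
              PySem.List.pyGetD
                (List.map (fun j => PySem.List.pyGetD (PySem.List.pyGetD g r [])
                  (PySem.Int.mod (j - k) 50) 0) (PySem.List.pyRange 0 50)) j 0
                = cell g r (PySem.Int.mod (j - k) 50) := by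
            intro j hj0 hj50
            have hjn : j = ((j.toNat : Nat) : Int) := (Int.toNat_of_nonneg hj0).symm
            rw [show (PySem.List.pyRange 0 (50 : Int)) = PySem.List.pyRange 0 ((50 : Nat) : Int)
              from by norm_num]
            rw [hjn, PySem.List.pyGetD_map_pyRange _ 50 j.toNat 0 (by omega)]
            rw [cell, ← hjn]
          refine ⟨?_, ?_, ⟨?_, ?_, ?_⟩, ?_⟩
          · exact nodup_foldl_add (fun y => (r, PySem.Int.mod (y + k) 50)) _ _
              (nodup_foldl_discard (fun y => (r, y)) _ _ hnd)
          · intro p hp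
            rw [hS2 p] at hp
            rcases hp with ⟨hp, _⟩ | ⟨y, _, rfl⟩
            · exact hbox p hp
            · exact ⟨hr0, hr6, PySem.Int.mod_nonneg _ h50, PySem.Int.mod_lt _ h50⟩
          · rw [PySem.List.length_pySetD]
            exact hg6
          · intro i h0 h6
            rw [hsel _ i h0]
            split_ifs with h
            · rw [List.length_map]
              decide
            · exact hrow i h0 h6
          · intro i j h0 h6 hj0 hj50
            simp only [cell]
            rw [hsel _ i h0]
            split_ifs with h
            · rw [show PySem.List.pyGetD (List.map (fun j => PySem.List.pyGetD
                  (PySem.List.pyGetD g r []) (PySem.Int.mod (j - k) 50) 0)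
                  (PySem.List.pyRange 0 50)) j 0 = cell g r (PySem.Int.mod (j - k) 50)
                from hnewget j hj0 hj50]
              exact h01 r _ hr0 hr6 (PySem.Int.mod_nonneg _ h50) (PySem.Int.mod_lt _ h50)
            · exact h01 i j h0 h6 hj0 hj50
          · intro i j h0 h6 hj0 hj50
            rw [hS2 (i, j)]
            simp only [cell]
            rw [hsel _ i h0]
            by_cases hir : i = r
            · rw [if_pos hir, hnewget j hj0 hj50]
              constructor
              · rintro (⟨_, hne⟩ | ⟨y, hy, heq⟩)
                · exact absurd hir hne
                · rw [Prod.ext_iff] at heq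
                  obtain ⟨_, hj'⟩ := heq
                  have hyb := hbox (r, y) hy
                  have hy' : y = PySem.Int.mod (j - k) 50 := by
                    rw [PySem.Int.mod_eq_emod_of_pos h50] at hj' ⊢
                    have h2 := hyb.2.2
                    simp only at h2
                    omega
                  rw [← hy']
                  exact (hiff r y hyb.1 hyb.2.1 hyb.2.2.1 hyb.2.2.2).mp hy
              · intro hcell
                refine Or.inr ⟨PySem.Int.mod (j - k) 50,
                  (hiff r _ hr0 hr6 (PySem.Int.mod_nonneg _ h50)
                    (PySem.Int.mod_lt _ h50)).mpr hcell, ?_⟩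
                rw [Prod.ext_iff]
                refine ⟨hir, ?_⟩
                show j = PySem.Int.mod (PySem.Int.mod (j - k) 50 + k) 50
                rw [PySem.Int.mod_eq_emod_of_pos h50, PySem.Int.mod_eq_emod_of_pos h50]
                omega
            · rw [if_neg hir]
              have hthis := hiff i j h0 h6 hj0 hj50
              constructor
              · rintro (⟨hp, _⟩ | ⟨y, _, heq⟩)
                · exact hthis.mp hp
                · rw [Prod.ext_iff] at heq
                  exact absurd heq.1 hir
              · intro hcell
                exact Or.inl ⟨hthis.mpr hcell, hir⟩
        · simp at hok
      · simp at hok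
    · rw [Bool.not_eq_true] at hrw
      by_cases hcl : PySem.Str.isIn "column" ins = true
      · -- column branch
        simp only [pvLineOK, hrect, hrw, hcl, Bool.false_eq_true, if_false, if_true] at hok
        simp only [stepA, stepB, hrect, hrw, hcl, Bool.false_eq_true, if_false, if_true]
        simp only [pvIdxOK] at hok
        split at hok
        · rename_i c3 c1 h3 h1
          split at hok
          · rename_i c k hce hke
            simp only [decide_eq_true_eq] at hok
            obtain ⟨hc0, hc50⟩ := hok
            rw [h3, h1]
            simp only [Option.getD_some]
            rw [hce, hke]
            simp only [Option.getD_some]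
            have h6 : (0 : Int) < 6 := by norm_num
            have hS1 : ∀ p : Int × Int,
                p ∈ List.foldl (fun s x => PySem.Set.discard s (x, c)) s
                    (List.map (fun p => p.1) (List.filter (fun p => p.2 == c) s)) ↔
                  p ∈ s ∧ p.2 ≠ c := by
              intro p
              rw [mem_foldl_discard (fun x => (x, c))
                (List.map (fun p => p.1) (List.filter (fun p => p.2 == c) s)) s p]
              constructor
              · rintro ⟨hp, hall⟩
                refine ⟨hp, fun hpc => ?_⟩
                exact hall p.1 ((mem_inCol s c p.1).mpr (by rw [← hpc]; exact hp))
                  (by rw [Prod.ext_iff]; exact ⟨rfl, hpc⟩)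
              · rintro ⟨hp, hne⟩
                refine ⟨hp, fun x hx heq => hne ?_⟩
                rw [heq]
            have hS2 : ∀ p : Int × Int,
                p ∈ List.foldl (fun s x => PySem.Set.add s (PySem.Int.mod (x + k) 6, c))
                    (List.foldl (fun s x => PySem.Set.discard s (x, c)) s
                      (List.map (fun p => p.1) (List.filter (fun p => p.2 == c) s)))
                    (List.map (fun p => p.1) (List.filter (fun p => p.2 == c) s)) ↔
                  (p ∈ s ∧ p.2 ≠ c) ∨
                    ∃ x, (x, c) ∈ s ∧ p = (PySem.Int.mod (x + k) 6, c) := by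
              intro p
              rw [mem_foldl_add (fun x => (PySem.Int.mod (x + k) 6, c))
                (List.map (fun p => p.1) (List.filter (fun p => p.2 == c) s)) _ p, hS1 p]
              constructor
              · rintro (h | ⟨x, hx, heq⟩)
                · exact Or.inl h
                · exact Or.inr ⟨x, (mem_inCol s c x).mp hx, heq⟩
              · rintro (h | ⟨x, hx, heq⟩)
                · exact Or.inl h
                · exact Or.inr ⟨x, (mem_inCol s c x).mpr hx, heq⟩
            have hcol : ∀ i : Int, 0 ≤ i → i < 6 →
                PySem.List.pyGetD
                  (List.map (fun i => PySem.List.pyGetD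
                    (PySem.List.pyGetD g (PySem.Int.mod (i - k) 6) []) c 0)
                    (PySem.List.pyRange 0 6)) i 0
                  = cell g (PySem.Int.mod (i - k) 6) c := by
              intro i h0 h6'
              have hin : i = ((i.toNat : Nat) : Int) := (Int.toNat_of_nonneg h0).symm
              have h := PySem.List.pyGetD_map_pyRange
                (fun i => PySem.List.pyGetD
                  (PySem.List.pyGetD g (PySem.Int.mod (i - k) 6) []) c 0) 6 i.toNat 0 (by omega)
              rw [← hin] at h
              simp only [Nat.cast_ofNat] at h
              simp only [cell]
              exact h
            have hGget : ∀ m : Int, 0 ≤ m →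
                PySem.List.pyGetD
                  (List.foldl
                    (fun g_1 i => PySem.List.pySetD g_1 i
                      (PySem.List.pySetD (PySem.List.pyGetD g_1 i []) c
                        (PySem.List.pyGetD
                          (List.map (fun i => PySem.List.pyGetD
                            (PySem.List.pyGetD g (PySem.Int.mod (i - k) 6) []) c 0)
                            (PySem.List.pyRange 0 6)) i 0)))
                    g (PySem.List.pyRange 0 6)) m []
                  = if m < (6 : Int) then
                      PySem.List.pySetD (PySem.List.pyGetD g m []) c
                        (PySem.List.pyGetD
                          (List.map (fun i => PySem.List.pyGetD
                            (PySem.List.pyGetD g (PySem.Int.mod (i - k) 6) []) c 0)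
                            (PySem.List.pyRange 0 6)) m 0)
                    else PySem.List.pyGetD g m [] := by
              intro m hm
              have h := gridFold_getD
                (fun i row => PySem.List.pySetD row c
                  (PySem.List.pyGetD
                    (List.map (fun i => PySem.List.pyGetD
                      (PySem.List.pyGetD g (PySem.Int.mod (i - k) 6) []) c 0)
                      (PySem.List.pyRange 0 6)) i 0)) 6 g (by omega) m hm
              simpa using h
            have hrowsel : ∀ (row : List Int), row.length = 50 → ∀ (v : Int) (j : Int), 0 ≤ j →
                PySem.List.pyGetD (PySem.List.pySetD row c v) j 0
                  = if j = c then v else PySem.List.pyGetD row j 0 := by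
              intro row hlen v j hj
              have hcN : c = ((c.toNat : Nat) : Int) := (Int.toNat_of_nonneg hc0).symm
              have hjn : j = ((j.toNat : Nat) : Int) := (Int.toNat_of_nonneg hj).symm
              rw [hcN, hjn, PySem.List.pyGetD_pySetD_natCast _ c.toNat j.toNat _ _ (by omega)]
              by_cases h : j.toNat = c.toNat
              · rw [if_pos h, if_pos (by exact_mod_cast h)]
              · rw [if_neg h, if_neg (by omega)]
            refine ⟨?_, ?_, ⟨?_, ?_, ?_⟩, ?_⟩
            · exact nodup_foldl_add (fun x => (PySem.Int.mod (x + k) 6, c)) _ _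
                (nodup_foldl_discard (fun x => (x, c)) _ _ hnd)
            · intro p hp
              rw [hS2 p] at hp
              rcases hp with ⟨hp, _⟩ | ⟨x, _, rfl⟩
              · exact hbox p hp
              · exact ⟨PySem.Int.mod_nonneg _ h6, PySem.Int.mod_lt _ h6, hc0, hc50⟩
            · have h := gridFold_length
                (fun i row => PySem.List.pySetD row c
                  (PySem.List.pyGetD
                    (List.map (fun i => PySem.List.pyGetD
                      (PySem.List.pyGetD g (PySem.Int.mod (i - k) 6) []) c 0)
                      (PySem.List.pyRange 0 6)) i 0)) 6 g
              simpa [hg6] using h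
            · intro i h0 h6'
              rw [hGget i h0, if_pos (by omega), PySem.List.length_pySetD]
              exact hrow i h0 h6'
            · intro i j h0 h6' hj0 hj50
              simp only [cell]
              rw [hGget i h0, if_pos (by omega), hrowsel _ (hrow i h0 h6') _ j hj0]
              split_ifs with h
              · rw [hcol i h0 h6']
                exact h01 _ c (PySem.Int.mod_nonneg _ h6) (PySem.Int.mod_lt _ h6) hc0 hc50
              · exact h01 i j h0 h6' hj0 hj50
            · intro i j h0 h6' hj0 hj50
              rw [hS2 (i, j)]
              simp only [cell]
              rw [hGget i h0, if_pos (by omega), hrowsel _ (hrow i h0 h6') _ j hj0]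
              by_cases hjc : j = c
              · rw [if_pos hjc, hcol i h0 h6']
                constructor
                · rintro (⟨_, hne⟩ | ⟨x, hx, heq⟩)
                  · exact absurd hjc hne
                  · rw [Prod.ext_iff] at heq
                    obtain ⟨hi', _⟩ := heq
                    have hxb := hbox (x, c) hx
                    have hx' : x = PySem.Int.mod (i - k) 6 := by
                      rw [PySem.Int.mod_eq_emod_of_pos h6] at hi' ⊢
                      have h2 := hxb.1
                      have h3 := hxb.2.1
                      simp only at h2 h3
                      omega
                    rw [← hx']
                    exact (hiff x c hxb.1 hxb.2.1 hxb.2.2.1 hxb.2.2.2).mp hx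
                · intro hcell
                  refine Or.inr ⟨PySem.Int.mod (i - k) 6,
                    (hiff _ c (PySem.Int.mod_nonneg _ h6) (PySem.Int.mod_lt _ h6)
                      hc0 hc50).mpr hcell, ?_⟩
                  rw [Prod.ext_iff]
                  refine ⟨?_, hjc⟩
                  show i = PySem.Int.mod (PySem.Int.mod (i - k) 6 + k) 6
                  rw [PySem.Int.mod_eq_emod_of_pos h6, PySem.Int.mod_eq_emod_of_pos h6]
                  omega
              · rw [if_neg hjc]
                have hthis := hiff i j h0 h6' hj0 hj50
                constructor
                · rintro (⟨hp, _⟩ | ⟨x, _, heq⟩)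
                  · exact hthis.mp hp
                  · rw [Prod.ext_iff] at heq
                    exact absurd heq.2 hjc
                · intro hcell
                  exact Or.inl ⟨hthis.mpr hcell, hjc⟩
          · simp at hok
        · simp at hok
      · rw [Bool.not_eq_true] at hcl
        simp only [stepA, stepB, hrect, hrw, hcl, Bool.false_eq_true, if_false]
        exact ⟨hnd, hbox, ⟨hg6, hrow, h01⟩, hiff⟩

-- ===== VERDICT (by name: the statement is the Claim_ definition above) =====
theorem solve_spec : Claim_equal_solve := by
  intro data _ hpre
  unfold Spec_solve solve solve_alt
  have key : ∀ l : List String, Pre_solve l →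
      SG (l.foldl stepA PySem.Set.empty)
        (l.foldl stepB (List.replicate 6 (List.replicate 50 (0 : Int)))) := by
    intro l hl
    induction l using List.reverseRecOn with
    | nil => exact rel_init
    | append_singleton xs x ih =>
      simp only [List.foldl_append, List.foldl_cons, List.foldl_nil]
      exact rel_step _ _ _ (hl x (by simp)) (ih (fun s hs => hl s (by simp [hs])))
  exact rel_count _ _ (key data hpre)
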